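-- pv_equiv track=rewrite | github.com/y-tetsu/math_puzzle | q51.py | perfect_shuffle
-- ===== SOURCE A (Python) =====
-- def perfect_shuffle(num):
--     """
--     2*(num-1)回でもとにもどるかチェックする
--     """
--     cards = [i for i in range(1, 2 * num + 1)]
--     goal = cards[:]
--
--     for _ in range(1, 2 * (num - 1) + 1):
--         tmp = []
--
--         for i in range(num):
--             tmp += [cards[i], cards[i + num]]
--
--         cards = tmp[:]
--
--     return 1 if cards == goal else 0
-- ===== SOURCE B (Python) =====
-- def perfect_shuffle(num):
--     """
--     2*(num-1)回でもとにもどるかチェックする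
--     """
--     if num <= 1:
--         return 1
--     return 1 if pow(2, 2 * (num - 1), 2 * num - 1) == 1 else 0
-- ===== Notes on version B (the rewrite author's own statement) =====
-- stated objective: faster
-- what changed: Replaces the O(num^2) simulation of 2(num-1) out-shuffles with the number-theoretic closed form: the shuffle permutation has the deck back in order after k steps iff 2^k = 1 (mod 2*num-1), computed by modular exponentiation; num <= 1 trivially returns 1.
import Mathlib
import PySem

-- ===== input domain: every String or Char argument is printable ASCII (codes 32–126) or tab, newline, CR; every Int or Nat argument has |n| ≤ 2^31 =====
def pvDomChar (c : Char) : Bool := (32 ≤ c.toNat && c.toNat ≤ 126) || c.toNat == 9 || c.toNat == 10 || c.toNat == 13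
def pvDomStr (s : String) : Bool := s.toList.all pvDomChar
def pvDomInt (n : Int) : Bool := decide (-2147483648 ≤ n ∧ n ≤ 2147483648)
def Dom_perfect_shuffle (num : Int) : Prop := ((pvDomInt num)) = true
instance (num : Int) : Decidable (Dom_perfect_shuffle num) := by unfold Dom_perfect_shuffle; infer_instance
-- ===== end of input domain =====

-- B replaces A's O(num^2) shuffle simulation by the closed form 2^(2(num-1)) ≡ 1 (mod 2num-1), via modular exponentiation.

-- ===== PORT A =====
-- pyGetD is exact here: every index A uses is 0 ≤ i < num ≤ i+num < 2*num = len(cards), so Python never raises.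
def perfect_shuffle (num : Int) : Int :=
  let cards0 := PySem.List.pyRange 1 (2 * num + 1) 1
  let goal := cards0
  let final :=
    (PySem.List.pyRange 1 (2 * (num - 1) + 1) 1).foldl
      (fun cards _ =>
        (PySem.List.pyRange 0 num 1).foldl
          (fun tmp i => tmp ++ [PySem.List.pyGetD cards i 0, PySem.List.pyGetD cards (i + num) 0])
          [])
      cards0
  if final = goal then 1 else 0

-- ===== PORT B =====
-- port of Python's built-in pow(b, e, m) (binary exponentiation), m > 0
def pvPowmod (b : Int) (e : Nat) (m : Int) : Int :=
  if e = 0 then 1 % m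
  else
    let h := pvPowmod b (e / 2) m
    if e % 2 = 0 then h * h % m else h * h % m * b % m
decreasing_by exact Nat.div_lt_self (Nat.pos_of_ne_zero (by assumption)) (by omega)

def perfect_shuffle_alt (num : Int) : Int :=
  if num ≤ 1 then 1
  else if pvPowmod 2 (2 * (num - 1)).toNat (2 * num - 1) = 1 then 1 else 0

-- ===== PRECONDITION & SPEC =====
def Spec_perfect_shuffle (num : Int) (out : Int) : Prop := out = perfect_shuffle_alt num
instance (num : Int) (out : Int) : Decidable (Spec_perfect_shuffle num out) := by unfold Spec_perfect_shuffle; infer_instance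

-- ===== CLAIM (what is proved, stated in full; the proofs are below) =====
def Claim_equal_perfect_shuffle : Prop := ∀ (num : Int), Dom_perfect_shuffle num → Spec_perfect_shuffle num (perfect_shuffle num)

-- ===== LEMMAS AND PROOFS =====

-- index sent by one shuffle: new position j holds the old card at pvF n j
def pvF (n j : Nat) : Nat := j / 2 + (j % 2) * n

-- card value (minus 1) at position j after k shuffles of the deck 1..2n
def pvPhi (n k j : Nat) : Nat := if j = 2 * n - 1 then j else (j * n ^ k) % (2 * n - 1)

-- one shuffle pass of A, as a function of the deck
def pvStep (n : Nat) (cards : List Int) : List Int :=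
  (PySem.List.pyRange 0 (n : Int) 1).foldl
    (fun tmp i => tmp ++ [PySem.List.pyGetD cards i 0, PySem.List.pyGetD cards (i + (n : Int)) 0])
    []

theorem pvPowmod_eq (b m : Int) : ∀ e : Nat, pvPowmod b e m = b ^ e % m := by
  intro e
  induction e using Nat.strong_induction_on with
  | _ e ih =>
    rw [pvPowmod]
    by_cases h0 : e = 0
    · simp [h0]
    · simp only [h0, if_false]
      have ihh := ih (e / 2) (Nat.div_lt_self (Nat.pos_of_ne_zero h0) (by omega))
      by_cases he : e % 2 = 0
      · simp only [he, if_true, ihh]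
        rw [← Int.mul_emod, ← pow_add]
        congr 2
        omega
      · simp only [he, if_false, ihh]
        have hx : ∀ x y : Int, x % m * y % m = x * y % m := fun x y => by
          rw [Int.mul_emod, Int.emod_emod_of_dvd _ dvd_rfl, ← Int.mul_emod]
        have he2 : b ^ (e / 2) * b ^ (e / 2) * b = b ^ e := by
          rw [← pow_add, ← pow_succ]; congr 1; omega
        rw [← Int.mul_emod, hx, he2]

theorem pv_foldl_pair (g h : Nat → Int) :
    ∀ (n : Nat) (acc : List Int),
      (List.range n).foldl (fun tmp k => tmp ++ [g k, h k]) acc =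
        acc ++ (List.range (2 * n)).map (fun j => if j % 2 = 0 then g (j / 2) else h (j / 2)) := by
  intro n
  induction n with
  | zero => simp
  | succ n ih =>
    intro acc
    rw [List.range_succ, List.foldl_append, ih]
    have h2 : 2 * (n + 1) = (2 * n + 1) + 1 := by omega
    rw [h2, List.range_succ, List.range_succ]
    simp only [List.foldl_cons, List.foldl_nil, List.map_append, List.map_cons, List.map_nil]
    have e1 : (2 * n) % 2 = 0 := by omega
    have e2 : (2 * n) / 2 = n := by omega
    have e3 : (2 * n + 1) % 2 = 1 := by omega
    have e4 : (2 * n + 1) / 2 = n := by omega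
    simp [e1, e2, e3, e4]

theorem pv_map_range_eq_iff (f g : Nat → Int) (n : Nat) :
    (List.range n).map f = (List.range n).map g ↔ ∀ i < n, f i = g i := by
  constructor
  · intro h i hi
    have h1 : ((List.range n).map f)[i]'(by simpa using hi) =
        ((List.range n).map g)[i]'(by simpa using hi) := List.getElem_of_eq h _
    simpa using h1
  · intro h
    exact List.map_congr_left (fun i hi => h i (List.mem_range.mp hi))

theorem pvStep_eq (n : Nat) (cards : List Int) :
    pvStep n cards = (List.range (2 * n)).map (fun j => cards.getD (pvF n j) 0) := by
  unfold pvStep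
  rw [PySem.List.pyRange_zero_nat, List.foldl_map]
  have hc : ∀ (k : Nat), (k : Int) + (n : Int) = ((k + n : Nat) : Int) := by intro k; push_cast; ring
  simp only [PySem.List.pyGetD_natCast, hc]
  rw [pv_foldl_pair (fun k => cards.getD k 0) (fun k => cards.getD (k + n) 0) n []]
  rw [List.nil_append]
  apply List.map_congr_left
  intro j hj
  unfold pvF
  by_cases hp : j % 2 = 0
  · simp [hp]
  · have hp1 : j % 2 = 1 := by omega
    simp [hp1]

theorem pvF_mul (n j : Nat) (hn : 2 ≤ n) (hj : j < 2 * n - 1) :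
    pvF n j = (j * n) % (2 * n - 1) := by
  rcases Nat.even_or_odd j with ⟨c, hc⟩ | ⟨c, hc⟩
  · subst hc
    have e1 : (c + c) / 2 = c := by omega
    have e2 : (c + c) % 2 = 0 := by omega
    have e3 : (c + c) * n = (2 * n - 1) * c + c := by
      have h4 : (2 * n - 1) * c + c = (2 * n - 1 + 1) * c := by ring
      rw [h4, show 2 * n - 1 + 1 = 2 * n from by omega]; ring
    rw [pvF, e1, e2, e3, Nat.mul_add_mod, Nat.mod_eq_of_lt (by omega)]
    omega
  · subst hc
    have e1 : (2 * c + 1) / 2 = c := by omega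
    have e2 : (2 * c + 1) % 2 = 1 := by omega
    have e3 : (2 * c + 1) * n = (2 * n - 1) * c + (c + n) := by
      have h4 : (2 * n - 1) * c + (c + n) = (2 * n - 1 + 1) * c + n := by ring
      rw [h4, show 2 * n - 1 + 1 = 2 * n from by omega]; ring
    rw [pvF, e1, e2, e3, Nat.mul_add_mod, Nat.mod_eq_of_lt (by omega)]
    omega

theorem pvPhi_step (n k j : Nat) (hn : 2 ≤ n) (hj : j < 2 * n) :
    pvPhi n k (pvF n j) = pvPhi n (k + 1) j := by
  by_cases hlast : j = 2 * n - 1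
  · subst hlast
    have e1 : (2 * n - 1) / 2 = n - 1 := by omega
    have e2 : (2 * n - 1) % 2 = 1 := by omega
    have e3 : pvF n (2 * n - 1) = 2 * n - 1 := by rw [pvF, e1, e2]; omega
    rw [e3]; simp [pvPhi]
  · have hj' : j < 2 * n - 1 := by omega
    have hf : pvF n j = (j * n) % (2 * n - 1) := pvF_mul n j hn hj'
    have hflt : pvF n j < 2 * n - 1 := by rw [hf]; exact Nat.mod_lt _ (by omega)
    rw [pvPhi, if_neg (by omega), pvPhi, if_neg hlast, hf, Nat.mod_mul_mod]
    congr 1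
    rw [pow_succ]; ring

theorem pvIter (n : Nat) (hn : 2 ≤ n) (k : Nat) :
    (pvStep n)^[k] ((List.range (2 * n)).map (fun j : Nat => 1 + (j : Int))) =
      (List.range (2 * n)).map (fun j : Nat => 1 + (pvPhi n k j : Int)) := by
  induction k with
  | zero =>
    simp only [Function.iterate_zero, id_eq]
    apply (pv_map_range_eq_iff _ _ _).mpr
    intro j hj
    by_cases hl : j = 2 * n - 1
    · rw [pvPhi, if_pos hl]
    · rw [pvPhi, if_neg hl, pow_zero, mul_one, Nat.mod_eq_of_lt (by omega)]
  | succ k ih =>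
    rw [Function.iterate_succ_apply', ih, pvStep_eq]
    apply (pv_map_range_eq_iff _ _ _).mpr
    intro j hj
    have hflt : pvF n j < 2 * n := by
      rcases Nat.mod_two_eq_zero_or_one j with h | h <;> simp [pvF, h] <;> omega
    rw [List.getD_eq_getElem _ _ (by simpa using hflt), List.getElem_map, List.getElem_range,
      pvPhi_step n k j hn hj]

theorem pvPhi_id_iff (n k : Nat) (hn : 2 ≤ n) :
    (∀ j < 2 * n, pvPhi n k j = j) ↔ n ^ k % (2 * n - 1) = 1 := by
  constructor
  · intro h
    have h1 := h 1 (by omega)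
    rwa [pvPhi, if_neg (by omega), one_mul] at h1
  · intro h j hj
    by_cases hl : j = 2 * n - 1
    · rw [pvPhi, if_pos hl]
    · rw [pvPhi, if_neg hl, Nat.mul_mod, h, mul_one, Nat.mod_mod_of_dvd _ dvd_rfl,
        Nat.mod_eq_of_lt (by omega)]

theorem pv_foldl_const {A B : Type} (S : A → A) :
    ∀ (l : List B) (init : A), l.foldl (fun c _ => S c) init = S^[l.length] init := by
  intro l
  induction l with
  | nil => intro init; simp
  | cons x xs ih =>
    intro init
    rw [List.foldl_cons, ih, List.length_cons, Function.iterate_succ_apply]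

theorem pv_pow_swap (n k : Nat) (hn : 2 ≤ n) :
    n ^ k % (2 * n - 1) = 1 ↔ 2 ^ k % (2 * n - 1) = 1 := by
  have hprod : (2 ^ k * n ^ k) % (2 * n - 1) = 1 := by
    have h2n : 2 * n % (2 * n - 1) = 1 := by
      have h := Nat.add_mod_left (2 * n - 1) 1
      rw [Nat.mod_eq_of_lt (show 1 < 2 * n - 1 by omega),
        show (2 * n - 1) + 1 = 2 * n from by omega] at h
      exact h
    rw [← mul_pow, Nat.pow_mod, h2n, one_pow, Nat.mod_eq_of_lt (by omega)]
  constructor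
  · intro h
    rwa [Nat.mul_mod, h, mul_one, Nat.mod_mod_of_dvd _ dvd_rfl] at hprod
  · intro h
    rwa [Nat.mul_mod, h, one_mul, Nat.mod_mod_of_dvd _ dvd_rfl] at hprod

-- ===== VERDICT (by name: the statement is the Claim_ definition above) =====
theorem perfect_shuffle_spec : Claim_equal_perfect_shuffle := by
  intro num _hdom
  unfold Spec_perfect_shuffle
  simp only [perfect_shuffle, perfect_shuffle_alt]
  by_cases hle : num ≤ 1
  · rw [if_pos hle, PySem.List.pyRange_one_eq_nil (show 2 * (num - 1) + 1 ≤ 1 by omega)]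
    simp
  · rw [if_neg hle]
    have hn2 : 2 ≤ num.toNat := by omega
    have hnum : num = (num.toNat : Int) := by omega
    set n := num.toNat with hndef
    rw [hnum]
    have hgoal : PySem.List.pyRange 1 (2 * (n : Int) + 1) 1 =
        (List.range (2 * n)).map (fun j : Nat => 1 + (j : Int)) := by
      rw [PySem.List.pyRange_one, show (2 * (n : Int) + 1 - 1).toNat = 2 * n from by omega]
    rw [hgoal]
    have hstep : (fun (cards : List Int) (_ : Int) =>
        (PySem.List.pyRange 0 (n : Int) 1).foldl
          (fun tmp i => tmp ++ [PySem.List.pyGetD cards i 0, PySem.List.pyGetD cards (i + (n : Int)) 0]) [])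
        = fun cards _ => pvStep n cards := rfl
    rw [hstep, pv_foldl_const (pvStep n)]
    have hlen : (PySem.List.pyRange 1 (2 * ((n : Int) - 1) + 1) 1).length = 2 * (n - 1) := by
      rw [PySem.List.length_pyRange_one]
      omega
    rw [hlen, pvIter n hn2]
    have hiff : ((List.range (2 * n)).map (fun j : Nat => 1 + (pvPhi n (2 * (n - 1)) j : Int)) =
        (List.range (2 * n)).map (fun j : Nat => 1 + (j : Int)))
        ↔ 2 ^ (2 * (n - 1)) % (2 * n - 1) = 1 := by
      rw [pv_map_range_eq_iff, ← pv_pow_swap n (2 * (n - 1)) hn2, ← pvPhi_id_iff n (2 * (n - 1)) hn2]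
      apply forall_congr'
      intro i
      apply imp_congr_right
      intro _
      omega
    have hKt : (2 * ((n : Int) - 1)).toNat = 2 * (n - 1) := by omega
    have hmod : pvPowmod 2 (2 * (n - 1)) (2 * (n : Int) - 1) =
        ((2 ^ (2 * (n - 1)) % (2 * n - 1) : Nat) : Int) := by
      rw [pvPowmod_eq, show (2 * (n : Int) - 1) = ((2 * n - 1 : Nat) : Int) from by omega]
      push_cast
      rfl
    rw [hKt]
    by_cases hc : 2 ^ (2 * (n - 1)) % (2 * n - 1) = 1
    · rw [if_pos (hiff.mpr hc), if_pos (by rw [hmod]; exact_mod_cast hc)]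
    · rw [if_neg (fun h => hc (hiff.mp h)),
        if_neg (fun h => hc (by rw [hmod] at h; exact_mod_cast h))]
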